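-- pv_equiv track=rewrite | github.com/Meta1807/lab-ddp-1 | lab3/lab03_eligma.py | convert_to_eligma
-- ===== SOURCE A (Python) =====
-- def convert_to_eligma(string):
--     offset = 0
--     alpha = ''
--     cipher_text = ''
--
--     # Add all numeric chars to offset, and all alphabetical chars to a new string.
--     for c in string:
--         if c.isnumeric():
--             offset += int(c)
--         else:
--             alpha += c
--     else:
--         string = ''  # Clean old string for GC (saves RAM :D)
--
--     for item in alpha:
--         '''
--         Overflow algorithm.
--         the range for characters in unicode is 97-122 (a-z), hence if we subtract by 97 and modulo,
--         we can account for offset overflows.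
--         This basically concatenates a character to cipher_text based on the ciphered char's offset from 'a'
--         '''
--         cipher_offset = (ord(item) + offset - ord('a')) % 26
--         cipher_text += (chr(ord('a') + cipher_offset))
--
--     return cipher_text
-- ===== SOURCE B (Python) =====
-- def convert_to_eligma(string):
--     # Same result as A: digit-sum offset, digits dropped, letters(-ish) Caesar-shifted.
--     # Built as a translation table applied by str.translate instead of per-char accumulation.
--     offset = sum(int(c) for c in string if c.isnumeric())
--     table = {ord(c): (None if c.isnumeric()
--                       else ord('a') + (ord(c) + offset - ord('a')) % 26)
--              for c in set(string)}
--     return string.translate(table)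
-- ===== Notes on version B (the rewrite author's own statement) =====
-- stated objective: idiomatic
-- what changed: B computes the digit-sum offset with a generator-sum, builds one translation dict over the distinct characters (digits map to None, others to their shifted ordinal) and lets str.translate do the traversal, replacing A's two accumulation loops over intermediate strings.
import Mathlib
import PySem

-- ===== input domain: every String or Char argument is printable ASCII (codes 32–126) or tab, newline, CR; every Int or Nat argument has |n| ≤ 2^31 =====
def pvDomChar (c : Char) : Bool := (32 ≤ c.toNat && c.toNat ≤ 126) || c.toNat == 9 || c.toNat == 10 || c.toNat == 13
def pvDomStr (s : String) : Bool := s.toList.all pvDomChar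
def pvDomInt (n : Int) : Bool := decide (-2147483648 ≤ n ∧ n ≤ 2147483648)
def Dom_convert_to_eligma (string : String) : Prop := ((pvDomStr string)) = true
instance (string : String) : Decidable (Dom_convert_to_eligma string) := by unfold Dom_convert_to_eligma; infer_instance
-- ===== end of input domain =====

-- B builds one translation table over the distinct characters and applies it, instead of
-- A's two accumulation loops over intermediate strings (objective: idiomatic; same cost).
-- On the ASCII domain, c.isnumeric() is PySem.Chars.isdigit and int(c) on a digit is ord(c) - 48;
-- ports use these exact facts.

-- ===== PORT A =====
def convert_to_eligma (string : String) : String :=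
  -- offset = 0; alpha = ''; one loop accumulating both
  let p : Int × List Char := string.toList.foldl
    (fun (acc : Int × List Char) c =>
      if PySem.Chars.isdigit c then (acc.1 + ((c.toNat : Int) - 48), acc.2)
      else (acc.1, acc.2 ++ [c])) (0, [])
  -- for item in alpha: cipher_text += chr(97 + (ord(item) + offset - 97) % 26)
  let cipher : List Char := p.2.foldl
    (fun acc item =>
      acc ++ [Char.ofNat (97 + PySem.Int.mod ((item.toNat : Int) + p.1 - 97) 26).toNat]) []
  String.ofList cipher

-- ===== PORT B =====
-- table value for a distinct character c (the dict-comprehension body)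
def eligVal (offset : Int) (c : Char) : Option Int :=
  if PySem.Chars.isdigit c then none
  else some (97 + PySem.Int.mod ((c.toNat : Int) + offset - 97) 26)

def convert_to_eligma_alt (string : String) : String :=
  -- offset = sum(int(c) for c in string if c.isnumeric())
  let offset : Int :=
    ((string.toList.filter (fun c => PySem.Chars.isdigit c)).map
      (fun c => (c.toNat : Int) - 48)).sum
  -- table = {ord(c): … for c in set(string)}
  let table : PySem.Dict Int (Option Int) :=
    (PySem.Set.ofList string.toList).foldl
      (fun d c => d.insert (c.toNat : Int) (eligVal offset c)) PySem.Dict.empty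
  -- string.translate(table): unmapped chars kept, None deletes, int maps to chr
  String.ofList (string.toList.foldl
    (fun acc c =>
      match table.get? (c.toNat : Int) with
      | none => acc ++ [c]
      | some none => acc
      | some (some n) => acc ++ [Char.ofNat n.toNat]) [])

-- ===== PRECONDITION & SPEC =====
def Spec_convert_to_eligma (string : String) (out : String) : Prop := out = convert_to_eligma_alt string
instance (string : String) (out : String) : Decidable (Spec_convert_to_eligma string out) := by unfold Spec_convert_to_eligma; infer_instance

-- ===== CLAIM (what is proved, stated in full; the proofs are below) =====
def Claim_equal_convert_to_eligma : Prop := ∀ (string : String), Dom_convert_to_eligma string → Spec_convert_to_eligma string (convert_to_eligma string)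

-- ===== LEMMAS AND PROOFS =====

-- ord is injective on Char (as an Int)
theorem elig_ord_inj {c x : Char} (h : (c.toNat : Int) = (x.toNat : Int)) : c = x := by
  have h2 : c.toNat = x.toNat := by exact_mod_cast h
  exact Char.ext (by unfold Char.toNat at h2; exact UInt32.toNat_inj.mp h2)

-- A's combined loop = (digit sum, non-digit filter)
theorem eligA_fold (l : List Char) (o : Int) (a : List Char) :
    l.foldl (fun (acc : Int × List Char) c =>
      if PySem.Chars.isdigit c then (acc.1 + ((c.toNat : Int) - 48), acc.2)
      else (acc.1, acc.2 ++ [c])) (o, a)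
    = (o + ((l.filter (fun c => PySem.Chars.isdigit c)).map (fun c => (c.toNat : Int) - 48)).sum,
       a ++ l.filter (fun c => !PySem.Chars.isdigit c)) := by
  induction l generalizing o a with
  | nil => simp
  | cons x t ih =>
    by_cases hx : PySem.Chars.isdigit x = true
    · simp [hx, ih]; ring
    · simp [hx, ih]

-- table lookup for a char not folded over is unchanged
theorem eligTable_get_notmem (off : Int) (s : List Char) (d : PySem.Dict Int (Option Int))
    (c : Char) (h : c ∉ s) :
    (s.foldl (fun d x => d.insert (x.toNat : Int) (eligVal off x)) d).get? (c.toNat : Int)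
      = d.get? (c.toNat : Int) := by
  induction s generalizing d with
  | nil => rfl
  | cons x t ih =>
    simp only [List.foldl_cons]
    rw [ih (h := fun hm => h (List.mem_cons_of_mem _ hm))]
    exact PySem.Dict.get?_insert_of_ne _ _ (fun he => h (by simp [elig_ord_inj he]))

-- table lookup for a char folded over gives its value
theorem eligTable_get_mem (off : Int) (s : List Char) (d : PySem.Dict Int (Option Int))
    (c : Char) (h : c ∈ s) :
    (s.foldl (fun d x => d.insert (x.toNat : Int) (eligVal off x)) d).get? (c.toNat : Int)
      = some (eligVal off c) := by
  induction s generalizing d with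
  | nil => cases h
  | cons x t ih =>
    by_cases ht : c ∈ t
    · simpa using ih _ ht
    · have hc : c = x := by rcases List.mem_cons.mp h with h' | h' <;> [exact h'; exact absurd h' ht]
      subst hc
      simp only [List.foldl_cons]
      rw [eligTable_get_notmem off t _ c ht, PySem.Dict.get?_insert_self]

-- B's translate loop over the full table = map over the non-digit filter
theorem eligB_translate (l : List Char) (off : Int) :
    l.foldl (fun acc c =>
      match (((PySem.Set.ofList l).foldl
          (fun d c => d.insert (c.toNat : Int) (eligVal off c)) PySem.Dict.empty).get?
            (c.toNat : Int)) with
      | none => acc ++ [c]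
      | some none => acc
      | some (some n) => acc ++ [Char.ofNat n.toNat]) []
    = (l.filter (fun c => !PySem.Chars.isdigit c)).map
        (fun c => Char.ofNat (97 + PySem.Int.mod ((c.toNat : Int) + off - 97) 26).toNat) := by
  have h := PySem.List.foldl_congr_mem (l := l) (init := ([] : List Char))
    (f := fun acc c =>
      match (((PySem.Set.ofList l).foldl
          (fun d c => d.insert (c.toNat : Int) (eligVal off c)) PySem.Dict.empty).get?
            (c.toNat : Int)) with
      | none => acc ++ [c]
      | some none => acc
      | some (some n) => acc ++ [Char.ofNat n.toNat])
    (g := fun acc c =>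
      if (!PySem.Chars.isdigit c) = true
      then acc ++ [Char.ofNat (97 + PySem.Int.mod ((c.toNat : Int) + off - 97) 26).toNat]
      else acc)
    (by intro acc c hc
        dsimp only
        rw [eligTable_get_mem off _ PySem.Dict.empty c ((PySem.Set.mem_ofList l c).mpr hc)]
        by_cases hd : PySem.Chars.isdigit c = true <;> simp [eligVal, hd])
  rw [h, PySem.List.foldl_append_if]
  simp

-- ===== VERDICT (by name: the statement is the Claim_ definition above) =====
theorem convert_to_eligma_spec : Claim_equal_convert_to_eligma := by
  intro s _
  unfold Spec_convert_to_eligma convert_to_eligma convert_to_eligma_alt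
  dsimp only
  rw [eligA_fold]
  dsimp only
  rw [PySem.List.foldl_append_singleton_eq_map, eligB_translate]
  simp
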